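-- pv_equiv track=rewrite | github.com/yang-kaist/prepare_reference | commons/worker_process/genome_toolkit/io/misc.py | sort_chrom_list
-- ===== SOURCE A (Python) =====
-- def sort_chrom_list(chrom_list):
-- 	#predefined_sex_chrom_slim_set = set(["X"])
-- 	predefined_sex_chrom_slim_set = set(["X","Y"])
-- 	predefined_mito_chrom_slim_set = set(["M","MT","Mt"])
--
-- 	autosome_slim_set = set()
-- 	sex_chrom_slim_set = set()
-- 	mito_chrom_slim_set = set()
-- 	other_chrom_set = set()
-- 	for chrom in chrom_list:
-- 		chrom_slim = chrom.replace("chr","")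
-- 		if chrom_slim.isnumeric():
-- 			autosome_slim_set.add(int(chrom_slim))
-- 		elif chrom_slim in predefined_sex_chrom_slim_set:
-- 			sex_chrom_slim_set.add(chrom_slim)
-- 		elif chrom_slim in predefined_mito_chrom_slim_set:
-- 			mito_chrom_slim_set.add("M")
-- 		else:
-- 			other_chrom_set.add(chrom)
--
-- 	autosome_list = ["chr"+str(chrom_slim) for chrom_slim in sorted(autosome_slim_set) ]
-- 	sex_chrom_list = ["chr"+str(chrom_slim) for chrom_slim in sorted(sex_chrom_slim_set) ]
-- 	mito_chrom_list = ["chr"+str(chrom_slim) for chrom_slim in sorted(mito_chrom_slim_set) ]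
-- 	other_chrom_list = sorted(other_chrom_set)
-- 	sorted_chrom_list = autosome_list + sex_chrom_list + mito_chrom_list + other_chrom_list
-- 	return sorted_chrom_list
-- ===== SOURCE B (Python) =====
-- def sort_chrom_list(chrom_list):
-- 	# One pass: tag each name with a sortable 4-tuple (category, int-key, str-key, output),
-- 	# deduplicate in a single set, sort once, project the output column.
-- 	tagged = set()
-- 	for chrom in chrom_list:
-- 		slim = chrom.replace("chr", "")
-- 		if slim.isnumeric():
-- 			n = int(slim)
-- 			tagged.add((0, n, "", "chr" + str(n)))
-- 		elif slim in ("X", "Y"):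
-- 			tagged.add((1, 0, slim, "chr" + slim))
-- 		elif slim in ("M", "MT", "Mt"):
-- 			tagged.add((2, 0, "M", "chrM"))
-- 		else:
-- 			tagged.add((3, 0, chrom, chrom))
-- 	return [t[3] for t in sorted(tagged)]
-- ===== Notes on version B (the rewrite author's own statement) =====
-- stated objective: alternative
-- what changed: A keeps four separate dedup buckets and sorts each of the four independently before concatenating; B makes one tagging pass that maps every name to a sortable 4-tuple (category, int key, str key, output), deduplicates all of them in a single set, sorts once, and projects the output column.
import Mathlib
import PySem

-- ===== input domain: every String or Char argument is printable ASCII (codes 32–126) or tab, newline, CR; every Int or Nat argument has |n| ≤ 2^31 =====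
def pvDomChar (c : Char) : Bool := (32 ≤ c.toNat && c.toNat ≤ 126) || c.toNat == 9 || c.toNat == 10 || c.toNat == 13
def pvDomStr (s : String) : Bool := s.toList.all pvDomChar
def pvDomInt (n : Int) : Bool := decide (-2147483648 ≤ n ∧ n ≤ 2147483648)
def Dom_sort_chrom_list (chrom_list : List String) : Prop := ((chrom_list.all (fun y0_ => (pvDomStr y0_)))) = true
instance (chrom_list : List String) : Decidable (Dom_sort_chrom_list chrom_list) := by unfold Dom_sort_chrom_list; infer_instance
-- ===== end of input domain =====

-- B replaces A's four buckets and four sorts by one tagging pass into a single set plus ONE sort of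
-- sortable 4-tuples; same return value (alternative decomposition, no speed claim).

-- ===== PORT A =====
-- A's two predefined constant sets.
def pvSexSet : PySem.Set String := PySem.Set.ofList ["X", "Y"]
def pvMitoSet : PySem.Set String := PySem.Set.ofList ["M", "MT", "Mt"]

-- A's loop body (one iteration of 'for chrom in chrom_list').
-- 'chrom_slim.isnumeric()' is PySem.Str.strIsdigit (on the printable-ASCII domain isnumeric = isdigit),
-- and 'int(chrom_slim)' is (PySem.Int.ofStr? slim).getD 0 — on that domain isnumeric-true strings are
-- nonempty ASCII digit runs, so int() never raises and the parse is always 'some'.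
def pvStepA (st : PySem.Set Int × PySem.Set String × PySem.Set String × PySem.Set String)
    (chrom : String) : PySem.Set Int × PySem.Set String × PySem.Set String × PySem.Set String :=
  let slim := PySem.Str.replace chrom "chr" ""
  if PySem.Str.strIsdigit slim then
    (PySem.Set.add st.1 ((PySem.Int.ofStr? slim).getD 0), st.2.1, st.2.2.1, st.2.2.2)
  else if PySem.Set.contains pvSexSet slim then
    (st.1, PySem.Set.add st.2.1 slim, st.2.2.1, st.2.2.2)
  else if PySem.Set.contains pvMitoSet slim then
    (st.1, st.2.1, PySem.Set.add st.2.2.1 "M", st.2.2.2)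
  else
    (st.1, st.2.1, st.2.2.1, PySem.Set.add st.2.2.2 chrom)

def sort_chrom_list (chrom_list : List String) : List String :=
  let st := chrom_list.foldl pvStepA
    ((PySem.Set.empty : PySem.Set Int), (PySem.Set.empty : PySem.Set String),
     (PySem.Set.empty : PySem.Set String), (PySem.Set.empty : PySem.Set String))
  ((PySem.List.sorted st.1 (fun x => x) false).map (fun k => "chr" ++ PySem.Int.toStr k))
    ++ ((PySem.List.sorted st.2.1 (fun x => x) false).map (fun k => "chr" ++ k))
    ++ ((PySem.List.sorted st.2.2.1 (fun x => x) false).map (fun k => "chr" ++ k))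
    ++ PySem.List.sorted st.2.2.2 (fun x => x) false

-- ===== PORT B =====
-- Python's lexicographic comparison of the 4-tuples (category, int key, str key, output).
def pvKey (t : Int × Int × String × String) : Lex (Int × Lex (Int × Lex (String × String))) :=
  toLex (t.1, toLex (t.2.1, toLex (t.2.2.1, t.2.2.2)))

-- Source B's loop body: classify one name into its tagged 4-tuple.
def pvClassify (chrom : String) : Int × Int × String × String :=
  let slim := PySem.Str.replace chrom "chr" ""
  if PySem.Str.strIsdigit slim then
    let n := (PySem.Int.ofStr? slim).getD 0
    (0, n, "", "chr" ++ PySem.Int.toStr n)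
  else if slim = "X" ∨ slim = "Y" then (1, 0, slim, "chr" ++ slim)
  else if slim = "M" ∨ slim = "MT" ∨ slim = "Mt" then (2, 0, "M", "chrM")
  else (3, 0, chrom, chrom)

def sort_chrom_list_alt (chrom_list : List String) : List String :=
  (PySem.List.sorted (PySem.Set.ofList (chrom_list.map pvClassify)) pvKey false).map
    (fun t => t.2.2.2)

-- ===== PRECONDITION & SPEC =====
def Spec_sort_chrom_list (chrom_list : List String) (out : List String) : Prop := out = sort_chrom_list_alt chrom_list
instance (chrom_list : List String) (out : List String) : Decidable (Spec_sort_chrom_list chrom_list out) := by unfold Spec_sort_chrom_list; infer_instance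

-- ===== CLAIM (what is proved, stated in full; the proofs are below) =====
def Claim_equal_sort_chrom_list : Prop := ∀ (chrom_list : List String), Dom_sort_chrom_list chrom_list → Spec_sort_chrom_list chrom_list (sort_chrom_list chrom_list)

-- ===== LEMMAS AND PROOFS =====

-- proof-side vocabulary
def pvSlim (c : String) : String := PySem.Str.replace c "chr" ""
def pvParse (c : String) : Int := (PySem.Int.ofStr? (pvSlim c)).getD 0
def pvCat (c : String) : Nat :=
  if PySem.Str.strIsdigit (pvSlim c) then 0
  else if PySem.Set.contains pvSexSet (pvSlim c) then 1
  else if PySem.Set.contains pvMitoSet (pvSlim c) then 2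
  else 3
def pvAutoKeys (l : List String) : List Int :=
  (l.filter (fun c => pvCat c = 0)).map pvParse
def pvSexKeys (l : List String) : List String :=
  (l.filter (fun c => pvCat c = 1)).map pvSlim
def pvMitoKeys (l : List String) : List String :=
  (l.filter (fun c => pvCat c = 2)).map (fun _ => "M")
def pvOtherKeys (l : List String) : List String :=
  l.filter (fun c => pvCat c = 3)

def emb0 (n : Int) : Int × Int × String × String := (0, n, "", "chr" ++ PySem.Int.toStr n)
def emb1 (k : String) : Int × Int × String × String := (1, 0, k, "chr" ++ k)
def emb2 (_k : String) : Int × Int × String × String := (2, 0, "M", "chrM")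
def emb3 (c : String) : Int × Int × String × String := (3, 0, c, c)

def pvTarget (l : List String) : List (Int × Int × String × String) :=
  ((PySem.List.sorted (PySem.Set.ofList (pvAutoKeys l)) (fun x => x) false).map emb0)
    ++ (((PySem.List.sorted (PySem.Set.ofList (pvSexKeys l)) (fun x => x) false).map emb1)
    ++ (((PySem.List.sorted (PySem.Set.ofList (pvMitoKeys l)) (fun x => x) false).map emb2)
    ++ ((PySem.List.sorted (PySem.Set.ofList (pvOtherKeys l)) (fun x => x) false).map emb3)))

-- cons unfoldings of the four key lists
lemma pvAutoKeys_cons (x : String) (xs : List String) :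
    pvAutoKeys (x :: xs) = if pvCat x = 0 then pvParse x :: pvAutoKeys xs else pvAutoKeys xs := by
  by_cases h : pvCat x = 0 <;> simp [pvAutoKeys, h]
lemma pvSexKeys_cons (x : String) (xs : List String) :
    pvSexKeys (x :: xs) = if pvCat x = 1 then pvSlim x :: pvSexKeys xs else pvSexKeys xs := by
  by_cases h : pvCat x = 1 <;> simp [pvSexKeys, h]
lemma pvMitoKeys_cons (x : String) (xs : List String) :
    pvMitoKeys (x :: xs) = if pvCat x = 2 then "M" :: pvMitoKeys xs else pvMitoKeys xs := by
  by_cases h : pvCat x = 2 <;> simp [pvMitoKeys, h]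
lemma pvOtherKeys_cons (x : String) (xs : List String) :
    pvOtherKeys (x :: xs) = if pvCat x = 3 then x :: pvOtherKeys xs else pvOtherKeys xs := by
  by_cases h : pvCat x = 3 <;> simp [pvOtherKeys, h]

-- A's loop is the four bucket folds at once
lemma foldA (l : List String) (a : PySem.Set Int) (b c d : PySem.Set String) :
    l.foldl pvStepA (a, b, c, d) =
      (PySem.Set.update a (pvAutoKeys l), PySem.Set.update b (pvSexKeys l),
       PySem.Set.update c (pvMitoKeys l), PySem.Set.update d (pvOtherKeys l)) := by
  induction l generalizing a b c d with
  | nil => simp [pvAutoKeys, pvSexKeys, pvMitoKeys, pvOtherKeys, PySem.Set.update_nil]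
  | cons x xs ih =>
    simp only [List.foldl_cons]
    rw [pvAutoKeys_cons, pvSexKeys_cons, pvMitoKeys_cons, pvOtherKeys_cons]
    by_cases h0 : PySem.Str.strIsdigit (pvSlim x)
    · have hs : pvStepA (a, b, c, d) x = (PySem.Set.add a (pvParse x), b, c, d) := by
        simp [pvStepA, pvSlim, pvParse] at h0 ⊢; simp [h0]
      have hc : pvCat x = 0 := by unfold pvCat; rw [if_pos h0]
      rw [hs, ih]
      simp [hc, PySem.Set.update_cons]
    · by_cases h1 : PySem.Set.contains pvSexSet (pvSlim x)
      · have hs : pvStepA (a, b, c, d) x = (a, PySem.Set.add b (pvSlim x), c, d) := by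
          simp [pvStepA, pvSlim] at h0 h1 ⊢; simp [h0, h1]
        have hc : pvCat x = 1 := by unfold pvCat; rw [if_neg h0, if_pos h1]
        rw [hs, ih]
        simp [hc, PySem.Set.update_cons]
      · by_cases h2 : PySem.Set.contains pvMitoSet (pvSlim x)
        · have hs : pvStepA (a, b, c, d) x = (a, b, PySem.Set.add c "M", d) := by
            simp [pvStepA, pvSlim] at h0 h1 h2 ⊢; simp [h0, h1, h2]
          have hc : pvCat x = 2 := by unfold pvCat; rw [if_neg h0, if_neg h1, if_pos h2]
          rw [hs, ih]
          simp [hc, PySem.Set.update_cons]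
        · have hs : pvStepA (a, b, c, d) x = (a, b, c, PySem.Set.add d x) := by
            simp [pvStepA, pvSlim] at h0 h1 h2 ⊢; simp [h0, h1, h2]
          have hc : pvCat x = 3 := by unfold pvCat; rw [if_neg h0, if_neg h1, if_neg h2]
          rw [hs, ih]
          simp [hc, PySem.Set.update_cons]

-- membership bridges for the two constant sets
lemma sex_contains_iff (s : String) :
    PySem.Set.contains pvSexSet s = true ↔ s = "X" ∨ s = "Y" := by
  rw [PySem.Set.contains_iff]; simp [pvSexSet, PySem.Set.mem_ofList]
lemma mito_contains_iff (s : String) :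
    PySem.Set.contains pvMitoSet s = true ↔ s = "M" ∨ s = "MT" ∨ s = "Mt" := by
  rw [PySem.Set.contains_iff]; simp [pvMitoSet, PySem.Set.mem_ofList]

-- classification per category
lemma classify0 (c : String) (h : pvCat c = 0) : pvClassify c = emb0 (pvParse c) := by
  have h0 : PySem.Str.strIsdigit (pvSlim c) = true := by
    by_contra h0
    unfold pvCat at h; rw [if_neg h0] at h
    split_ifs at h
  unfold pvSlim at h0
  simp only [pvClassify, emb0, pvParse, pvSlim]
  rw [if_pos h0]
lemma classify1 (c : String) (h : pvCat c = 1) : pvClassify c = emb1 (pvSlim c) := by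
  have h0 : ¬ PySem.Str.strIsdigit (pvSlim c) = true := by
    intro h0; unfold pvCat at h; rw [if_pos h0] at h; exact absurd h (by decide)
  have h1 : PySem.Set.contains pvSexSet (pvSlim c) = true := by
    by_contra h1
    unfold pvCat at h; rw [if_neg h0, if_neg h1] at h
    split_ifs at h <;> exact absurd h (by decide)
  have hxy := (sex_contains_iff _).mp h1
  unfold pvSlim at h0 hxy
  simp only [pvClassify, emb1, pvSlim]
  rw [if_neg h0, if_pos hxy]
lemma classify2 (c : String) (h : pvCat c = 2) : pvClassify c = emb2 "M" := by
  have h0 : ¬ PySem.Str.strIsdigit (pvSlim c) = true := by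
    intro h0; unfold pvCat at h; rw [if_pos h0] at h; exact absurd h (by decide)
  have h1 : ¬ PySem.Set.contains pvSexSet (pvSlim c) = true := by
    intro h1; unfold pvCat at h; rw [if_neg h0, if_pos h1] at h; exact absurd h (by decide)
  have h2 : PySem.Set.contains pvMitoSet (pvSlim c) = true := by
    by_contra h2
    unfold pvCat at h; rw [if_neg h0, if_neg h1, if_neg h2] at h
    exact absurd h (by decide)
  have hns : ¬ (pvSlim c = "X" ∨ pvSlim c = "Y") := fun hx => h1 ((sex_contains_iff _).mpr hx)
  have hm := (mito_contains_iff _).mp h2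
  unfold pvSlim at h0 hns hm
  simp only [pvClassify, emb2]
  rw [if_neg h0, if_neg hns, if_pos hm]
lemma classify3 (c : String) (h : pvCat c = 3) : pvClassify c = emb3 c := by
  have h0 : ¬ PySem.Str.strIsdigit (pvSlim c) = true := by
    intro h0; unfold pvCat at h; rw [if_pos h0] at h; exact absurd h (by decide)
  have h1 : ¬ PySem.Set.contains pvSexSet (pvSlim c) = true := by
    intro h1; unfold pvCat at h; rw [if_neg h0, if_pos h1] at h; exact absurd h (by decide)
  have h2 : ¬ PySem.Set.contains pvMitoSet (pvSlim c) = true := by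
    intro h2; unfold pvCat at h; rw [if_neg h0, if_neg h1, if_pos h2] at h
    exact absurd h (by decide)
  have hns : ¬ (pvSlim c = "X" ∨ pvSlim c = "Y") := fun hx => h1 ((sex_contains_iff _).mpr hx)
  have hnm : ¬ (pvSlim c = "M" ∨ pvSlim c = "MT" ∨ pvSlim c = "Mt") :=
    fun hx => h2 ((mito_contains_iff _).mpr hx)
  unfold pvSlim at h0 hns hnm
  simp only [pvClassify, emb3]
  rw [if_neg h0, if_neg hns, if_neg hnm]

lemma cat_lt4 (c : String) : pvCat c = 0 ∨ pvCat c = 1 ∨ pvCat c = 2 ∨ pvCat c = 3 := by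
  unfold pvCat; split_ifs <;> simp

-- the tagged multiset is exactly the four key lists, embedded
lemma mem_classify_iff (l : List String) (x : Int × Int × String × String) :
    x ∈ l.map pvClassify ↔
      (∃ k ∈ pvAutoKeys l, emb0 k = x) ∨ (∃ k ∈ pvSexKeys l, emb1 k = x) ∨
      (∃ k ∈ pvMitoKeys l, emb2 k = x) ∨ (∃ k ∈ pvOtherKeys l, emb3 k = x) := by
  constructor
  · intro hx
    rcases List.mem_map.mp hx with ⟨c, hc, rfl⟩
    rcases cat_lt4 c with h | h | h | h
    · exact Or.inl ⟨pvParse c, List.mem_map.mpr ⟨c, List.mem_filter.mpr ⟨hc, by simp [h]⟩, rfl⟩,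
        (classify0 c h).symm⟩
    · exact Or.inr (Or.inl ⟨pvSlim c, List.mem_map.mpr ⟨c, List.mem_filter.mpr ⟨hc, by simp [h]⟩, rfl⟩,
        (classify1 c h).symm⟩)
    · exact Or.inr (Or.inr (Or.inl ⟨"M", List.mem_map.mpr ⟨c, List.mem_filter.mpr ⟨hc, by simp [h]⟩, rfl⟩,
        (classify2 c h).symm⟩))
    · exact Or.inr (Or.inr (Or.inr ⟨c, List.mem_filter.mpr ⟨hc, by simp [h]⟩,
        (classify3 c h).symm⟩))
  · intro hx
    rcases hx with ⟨k, hk, rfl⟩ | ⟨k, hk, rfl⟩ | ⟨k, hk, rfl⟩ | ⟨k, hk, rfl⟩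
    · rcases List.mem_map.mp hk with ⟨c, hc, rfl⟩
      rcases List.mem_filter.mp hc with ⟨hcl, hcat⟩
      exact List.mem_map.mpr ⟨c, hcl, classify0 c (by simpa using hcat)⟩
    · rcases List.mem_map.mp hk with ⟨c, hc, rfl⟩
      rcases List.mem_filter.mp hc with ⟨hcl, hcat⟩
      exact List.mem_map.mpr ⟨c, hcl, classify1 c (by simpa using hcat)⟩
    · rcases List.mem_map.mp hk with ⟨c, hc, rfl⟩
      rcases List.mem_filter.mp hc with ⟨hcl, hcat⟩
      exact List.mem_map.mpr ⟨c, hcl, classify2 c (by simpa using hcat)⟩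
    · rcases List.mem_filter.mp hk with ⟨hcl, hcat⟩
      exact List.mem_map.mpr ⟨k, hcl, classify3 k (by simpa using hcat)⟩

-- the mito key list dedups to [] or ["M"]
lemma mito_set_shape (l : List String) :
    PySem.Set.ofList (pvMitoKeys l) = [] ∨ PySem.Set.ofList (pvMitoKeys l) = ["M"] := by
  unfold pvMitoKeys
  induction (l.filter (fun c => pvCat c = 2)) with
  | nil => left; rfl
  | cons x xs ih =>
    right
    rw [List.map_cons, PySem.Set.ofList_cons]
    rcases ih with h | h <;> rw [h] <;> rfl

lemma sorted_set_nodup {κ : Type} [LinearOrder κ] [BEq κ] [LawfulBEq κ] (xs : List κ) :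
    (PySem.List.sorted (PySem.Set.ofList xs) (fun x => x) false).Nodup :=
  ((PySem.List.sorted_perm (PySem.Set.ofList xs) (fun x => x) false).symm).nodup
    (PySem.Set.nodup_ofList xs)

-- lex-key comparisons
lemma key_lt_of_cat {a b : Int × Int × String × String} (h : a.1 < b.1) : pvKey a < pvKey b := by
  unfold pvKey; exact Prod.Lex.toLex_lt_toLex.mpr (Or.inl h)
lemma key_lt_emb0 {n m : Int} (h : n < m) : pvKey (emb0 n) < pvKey (emb0 m) := by
  unfold pvKey emb0
  exact Prod.Lex.toLex_lt_toLex.mpr (Or.inr ⟨rfl, Prod.Lex.toLex_lt_toLex.mpr (Or.inl h)⟩)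
lemma key_lt_emb1 {s t : String} (h : s < t) : pvKey (emb1 s) < pvKey (emb1 t) := by
  unfold pvKey emb1
  exact Prod.Lex.toLex_lt_toLex.mpr (Or.inr ⟨rfl,
    Prod.Lex.toLex_lt_toLex.mpr (Or.inr ⟨rfl, Prod.Lex.toLex_lt_toLex.mpr (Or.inl h)⟩)⟩)
lemma key_lt_emb3 {s t : String} (h : s < t) : pvKey (emb3 s) < pvKey (emb3 t) := by
  unfold pvKey emb3
  exact Prod.Lex.toLex_lt_toLex.mpr (Or.inr ⟨rfl,
    Prod.Lex.toLex_lt_toLex.mpr (Or.inr ⟨rfl, Prod.Lex.toLex_lt_toLex.mpr (Or.inl h)⟩)⟩)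

lemma target_nodup (l : List String) : (pvTarget l).Nodup := by
  unfold pvTarget
  have h0 : ((PySem.List.sorted (PySem.Set.ofList (pvAutoKeys l)) (fun x => x) false).map emb0).Nodup :=
    List.Nodup.map (fun a b h => by simpa [emb0] using congrArg (fun t => t.2.1) h) (sorted_set_nodup _)
  have h1 : ((PySem.List.sorted (PySem.Set.ofList (pvSexKeys l)) (fun x => x) false).map emb1).Nodup :=
    List.Nodup.map (fun a b h => by simpa [emb1] using congrArg (fun t => t.2.2.1) h) (sorted_set_nodup _)
  have h2 : ((PySem.List.sorted (PySem.Set.ofList (pvMitoKeys l)) (fun x => x) false).map emb2).Nodup := by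
    rcases mito_set_shape l with h | h <;> rw [h] <;> simp [PySem.List.sorted, PySem.List.insertBy]
  have h3 : ((PySem.List.sorted (PySem.Set.ofList (pvOtherKeys l)) (fun x => x) false).map emb3).Nodup :=
    List.Nodup.map (fun a b h => by simpa [emb3] using congrArg (fun t => t.2.2.1) h) (sorted_set_nodup _)
  refine List.nodup_append.mpr ⟨h0, List.nodup_append.mpr ⟨h1, List.nodup_append.mpr ⟨h2, h3, ?_⟩, ?_⟩, ?_⟩
  · intro x hx y hy
    rcases List.mem_map.mp hx with ⟨k, _, rfl⟩
    rcases List.mem_map.mp hy with ⟨m, _, rfl⟩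
    simp [emb2, emb3, Prod.ext_iff]
  · intro x hx y hy
    rcases List.mem_map.mp hx with ⟨k, _, rfl⟩
    rcases List.mem_append.mp hy with hy | hy <;> rcases List.mem_map.mp hy with ⟨m, _, rfl⟩ <;>
      simp [emb1, emb2, emb3, Prod.ext_iff]
  · intro x hx y hy
    rcases List.mem_map.mp hx with ⟨k, _, rfl⟩
    rcases List.mem_append.mp hy with hy | hy
    · rcases List.mem_map.mp hy with ⟨m, _, rfl⟩
      simp [emb0, emb1, Prod.ext_iff]
    · rcases List.mem_append.mp hy with hy | hy <;> rcases List.mem_map.mp hy with ⟨m, _, rfl⟩ <;>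
        simp [emb0, emb2, emb3, Prod.ext_iff]

lemma target_pairwise (l : List String) :
    (pvTarget l).Pairwise (fun a b => pvKey a < pvKey b) := by
  unfold pvTarget
  have p0 : ((PySem.List.sorted (PySem.Set.ofList (pvAutoKeys l)) (fun x => x) false).map emb0).Pairwise
      (fun a b => pvKey a < pvKey b) :=
    (PySem.List.sorted_ofList_pairwise_lt (pvAutoKeys l)).map emb0 (fun a b h => key_lt_emb0 h)
  have p1 : ((PySem.List.sorted (PySem.Set.ofList (pvSexKeys l)) (fun x => x) false).map emb1).Pairwise
      (fun a b => pvKey a < pvKey b) :=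
    (PySem.List.sorted_ofList_pairwise_lt (pvSexKeys l)).map emb1 (fun a b h => key_lt_emb1 h)
  have p2 : ((PySem.List.sorted (PySem.Set.ofList (pvMitoKeys l)) (fun x => x) false).map emb2).Pairwise
      (fun a b => pvKey a < pvKey b) := by
    rcases mito_set_shape l with h | h <;> rw [h] <;>
      simp [PySem.List.sorted, PySem.List.insertBy]
  have p3 : ((PySem.List.sorted (PySem.Set.ofList (pvOtherKeys l)) (fun x => x) false).map emb3).Pairwise
      (fun a b => pvKey a < pvKey b) :=
    (PySem.List.sorted_ofList_pairwise_lt (pvOtherKeys l)).map emb3 (fun a b h => key_lt_emb3 h)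
  refine List.pairwise_append.mpr ⟨p0, List.pairwise_append.mpr ⟨p1,
    List.pairwise_append.mpr ⟨p2, p3, ?_⟩, ?_⟩, ?_⟩
  · intro x hx y hy
    rcases List.mem_map.mp hx with ⟨k, _, rfl⟩; rcases List.mem_map.mp hy with ⟨m, _, rfl⟩
    exact key_lt_of_cat (by norm_num [emb2, emb3])
  · intro x hx y hy
    rcases List.mem_map.mp hx with ⟨k, _, rfl⟩
    rcases List.mem_append.mp hy with hy | hy <;> rcases List.mem_map.mp hy with ⟨m, _, rfl⟩
    · exact key_lt_of_cat (by norm_num [emb1, emb2])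
    · exact key_lt_of_cat (by norm_num [emb1, emb3])
  · intro x hx y hy
    rcases List.mem_map.mp hx with ⟨k, _, rfl⟩
    rcases List.mem_append.mp hy with hy | hy
    · rcases List.mem_map.mp hy with ⟨m, _, rfl⟩
      exact key_lt_of_cat (by norm_num [emb0, emb1])
    · rcases List.mem_append.mp hy with hy | hy <;> rcases List.mem_map.mp hy with ⟨m, _, rfl⟩
      · exact key_lt_of_cat (by norm_num [emb0, emb2])
      · exact key_lt_of_cat (by norm_num [emb0, emb3])

lemma target_perm (l : List String) :
    (pvTarget l).Perm (PySem.Set.ofList (l.map pvClassify)) := by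
  rw [List.perm_ext_iff_of_nodup (target_nodup l) (PySem.Set.nodup_ofList _)]
  intro x
  rw [PySem.Set.mem_ofList, mem_classify_iff]
  unfold pvTarget
  simp only [List.mem_append, List.mem_map, PySem.List.mem_sorted, PySem.Set.mem_ofList]

lemma alt_eq_target (l : List String) :
    PySem.List.sorted (PySem.Set.ofList (l.map pvClassify)) pvKey false = pvTarget l :=
  PySem.List.sorted_eq_of_perm_of_pairwise_lt _ _ pvKey (target_perm l) (target_pairwise l)

-- projecting the embedded mito block gives A's "chr"+k strings
lemma mito_proj (l : List String) :
    (PySem.List.sorted (PySem.Set.ofList (pvMitoKeys l)) (fun x => x) false).map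
        ((fun t : Int × Int × String × String => t.2.2.2) ∘ emb2) =
      (PySem.List.sorted (PySem.Set.ofList (pvMitoKeys l)) (fun x => x) false).map
        (fun k => "chr" ++ k) := by
  rcases mito_set_shape l with h | h <;> rw [h] <;> rfl

-- ===== VERDICT (by name: the statement is the Claim_ definition above) =====
theorem sort_chrom_list_spec : Claim_equal_sort_chrom_list := by
  intro l _
  show sort_chrom_list l = sort_chrom_list_alt l
  unfold sort_chrom_list sort_chrom_list_alt
  rw [foldA, alt_eq_target]
  unfold pvTarget
  simp only [PySem.Set.update_empty, List.map_append, List.map_map]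
  rw [mito_proj,
    show ((fun t : Int × Int × String × String => t.2.2.2) ∘ emb0)
      = (fun k => "chr" ++ PySem.Int.toStr k) from rfl,
    show ((fun t : Int × Int × String × String => t.2.2.2) ∘ emb1)
      = (fun k => "chr" ++ k) from rfl,
    show ((fun t : Int × Int × String × String => t.2.2.2) ∘ emb3)
      = (fun c : String => c) from rfl, List.map_id']
  simp [List.append_assoc]
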